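-- pv_equiv track=rewrite | github.com/ATP-Protocol/atp-protocol | sdk/python/atp_protocol/policy.py | _check_enumeration
-- ===== SOURCE A (Python) =====
-- from typing import Any, Dict, List, Optional
--
-- def _check_enumeration(permitted: List[Any], value: Any) -> bool:
--     """
--     Check if a value matches the enumeration constraint.
--     Supports domain matching (e.g., "@approved-vendors.com" matches "user@approved-vendors.com").
--     """
--     if isinstance(value, str):
--         for p in permitted:
--             if isinstance(p, str) and p.startswith("@"):
--                 if value.endswith(p):
--                     return True
--             elif p == value:
--                 return True
--         return False
--     return value in permitted
-- ===== SOURCE B (Python) =====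
-- def _check_enumeration(permitted, value):
--     """
--     Check if a value matches the enumeration constraint.
--     Supports domain matching (e.g., "@approved-vendors.com" matches "user@approved-vendors.com").
--     """
--     if isinstance(value, str):
--         suffixes = [p for p in permitted if isinstance(p, str) and p.startswith("@")]
--         exacts = [p for p in permitted if not (isinstance(p, str) and p.startswith("@"))]
--         return any(value.endswith(s) for s in suffixes) or value in exacts
--     return value in permitted
-- ===== Notes on version B (the rewrite author's own statement) =====
-- stated objective: simpler
-- what changed: Replaced the single interleaved branched scan with a classify-then-check shape: partition permitted into @-suffix patterns and exact entries, then 'any endswith' over suffixes or a plain membership test over exacts.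
import Mathlib
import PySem

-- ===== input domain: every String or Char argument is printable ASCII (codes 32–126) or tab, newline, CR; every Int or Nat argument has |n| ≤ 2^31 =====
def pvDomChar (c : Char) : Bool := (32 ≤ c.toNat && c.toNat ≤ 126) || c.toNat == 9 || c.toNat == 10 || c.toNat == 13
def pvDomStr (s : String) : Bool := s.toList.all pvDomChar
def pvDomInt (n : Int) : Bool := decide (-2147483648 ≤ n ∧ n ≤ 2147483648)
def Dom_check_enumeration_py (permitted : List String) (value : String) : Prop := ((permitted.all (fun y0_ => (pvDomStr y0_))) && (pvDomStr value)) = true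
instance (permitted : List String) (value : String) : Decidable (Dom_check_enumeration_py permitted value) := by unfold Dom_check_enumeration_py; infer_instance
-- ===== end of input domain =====

-- ===== PORT A =====
-- Header: B partitions the permitted list into @-suffix patterns and exact entries and
-- checks each class separately (objective: simpler); A does one interleaved branched scan.
-- (value is always a string here, so A's non-string fallback branch is unreachable.)
def check_enumeration_py (permitted : List String) (value : String) : Bool :=
  match permitted with
  | [] => false
  | p :: rest =>
    if PySem.Str.startswith p "@" then
      if PySem.Str.endswith value p then true
      else check_enumeration_py rest value
    else if p == value then true
    else check_enumeration_py rest value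

-- ===== PORT B =====
def check_enumeration_py_alt (permitted : List String) (value : String) : Bool :=
  let suffixes := permitted.filter (fun p => PySem.Str.startswith p "@")
  let exacts := permitted.filter (fun p => !(PySem.Str.startswith p "@"))
  suffixes.any (fun s => PySem.Str.endswith value s) || exacts.any (fun p => p == value)

-- ===== PRECONDITION & SPEC =====
def Spec_check_enumeration_py (permitted : List String) (value : String) (out : Bool) : Prop := out = check_enumeration_py_alt permitted value
instance (permitted : List String) (value : String) (out : Bool) : Decidable (Spec_check_enumeration_py permitted value out) := by unfold Spec_check_enumeration_py; infer_instance

-- ===== CLAIM (what is proved, stated in full; the proofs are below) =====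
def Claim_equal_check_enumeration_py : Prop := ∀ (permitted : List String) (value : String), Dom_check_enumeration_py permitted value → Spec_check_enumeration_py permitted value (check_enumeration_py permitted value)

-- ===== LEMMAS AND PROOFS =====

theorem check_enum_eq (permitted : List String) (value : String) :
    check_enumeration_py permitted value = check_enumeration_py_alt permitted value := by
  induction permitted with
  | nil => rfl
  | cons p rest ih =>
    simp only [check_enumeration_py, check_enumeration_py_alt, List.filter_cons] at *
    by_cases h : PySem.Str.startswith p "@" = true <;>
      simp_all [Bool.or_assoc, Bool.or_left_comm, Bool.beq_eq_decide_eq]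

-- ===== VERDICT (by name: the statement is the Claim_ definition above) =====
theorem check_enumeration_py_spec : Claim_equal_check_enumeration_py := by
  intro permitted value _
  exact check_enum_eq permitted value
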